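-- pv_equiv track=rewrite | github.com/cape-ph/cape-cod | capeinfra/swimlane.py | _resolve_subnet_dependencies
-- ===== SOURCE A (Python) =====
-- from enum import StrEnum, auto
-- from typing import Any
--
-- class SubnetType(StrEnum):
--     """Enum of all reserved subnet types for a swimlane.
--
--     The order of members of the enum is important. At a minimum it implies the
--     order the subnets should be created in.
--
--     Types are as follows:
--         * `nat`: the subnet will be given a nat gateway. at present, this
--                  this gateway will be an internet gateway and the NAT will be
--                  for internet egress. no other gateways are yet supported
--                  (meaning no private NAT)
--         * `vpn`: any subnet marked as the VPN type will be configured to be a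
--                  target of the external client VPN setup.
--         * `compute`: there is no special handling for this type at this time,
--                      but the name is reserved for the future
--         * `app`: there is no special handling for this type at this time, but
--                  the name is reserved for the future
--     """
--
--     NAT = auto()
--     VPN = auto()
--     COMPUTE = auto()
--     APP = auto()
--
-- def _resolve_subnet_dependencies(
--     sn_configs: dict[str, dict[str, Any]]
-- ):
--     """Return creation-ordered dict of {name:subnet_config}.
--
--     This is a very naive implementation of a dependency resolver. Right now
--     we just ensure order based on subnet type, with nat subnets being
--     handled first as we need their nat gateways available for internet
--     egress for other subnets.
--
--     Args:
--         sn_configs: Unordered dict of format {sn_name: sn_config}.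
--     Returns:
--         A dict who's insertion order is the order in which subnets should be
--         created.
--     """
--     ordered_subnet_configs = {}
--     processed_keys = []
--
--     # SubnetType members are in the order we're going to create subnets in.
--     # As we use a string enum for that, we can't really sort the items based
--     # on the enum as it wants to use lexicographical sort. We could make
--     # ge/le methods in the enum class to support that i guess, but we could
--     # also just accept a small performance hit for multiple loops here as
--     # it will just slow the deployment down by a tad. In reality we may
--     # come up with a better dependency resolution algo anyway that could
--     # make any optimizaion done now useless anyway. So multiple loops it
--     # is...
--
--     # first insert all the subnets with known types from our enumeration
--     # NOTE: the for...in here is in the order we want due to how SubnetType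
--     #       is created. Don't go mucking with the order of types.
--     for sn_type in SubnetType:
--         for sn_name, sn_cfg in sn_configs.items():
--             if sn_type == sn_cfg.get("type", None):
--                 ordered_subnet_configs[sn_name] = sn_cfg
--                 processed_keys.append(sn_name)
--
--     # now add everything else that has a type we don't know about
--     ordered_subnet_configs.update(
--         {k: v for k, v in sn_configs.items() if k not in processed_keys}
--     )
--
--     # and return the sorted dict
--     return ordered_subnet_configs
-- ===== SOURCE B (Python) =====
-- from enum import StrEnum, auto
-- from typing import Any
--
-- class SubnetType(StrEnum):
--     NAT = auto()
--     VPN = auto()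
--     COMPUTE = auto()
--     APP = auto()
--
-- def _resolve_subnet_dependencies(
--     sn_configs: dict[str, dict[str, Any]]
-- ):
--     """Single-pass bucket partition: drop each config into the bucket of its
--     subnet type (or the 'other' bucket), then concatenate buckets in
--     SubnetType creation order."""
--     buckets = {t: [] for t in SubnetType}
--     other = []
--     for name, cfg in sn_configs.items():
--         buckets.get(cfg.get("type", None), other).append((name, cfg))
--     result = []
--     for t in SubnetType:
--         result += buckets[t]
--     return dict(result + other)
-- ===== Notes on version B (the rewrite author's own statement) =====
-- stated objective: simpler
-- what changed: Replaces A's per-type rescans of the whole dict (plus a processed_keys membership list for the leftovers) with a single partitioning pass that drops each config into its type's bucket (or an 'other' bucket) and concatenates the buckets in SubnetType creation order.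
import Mathlib
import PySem

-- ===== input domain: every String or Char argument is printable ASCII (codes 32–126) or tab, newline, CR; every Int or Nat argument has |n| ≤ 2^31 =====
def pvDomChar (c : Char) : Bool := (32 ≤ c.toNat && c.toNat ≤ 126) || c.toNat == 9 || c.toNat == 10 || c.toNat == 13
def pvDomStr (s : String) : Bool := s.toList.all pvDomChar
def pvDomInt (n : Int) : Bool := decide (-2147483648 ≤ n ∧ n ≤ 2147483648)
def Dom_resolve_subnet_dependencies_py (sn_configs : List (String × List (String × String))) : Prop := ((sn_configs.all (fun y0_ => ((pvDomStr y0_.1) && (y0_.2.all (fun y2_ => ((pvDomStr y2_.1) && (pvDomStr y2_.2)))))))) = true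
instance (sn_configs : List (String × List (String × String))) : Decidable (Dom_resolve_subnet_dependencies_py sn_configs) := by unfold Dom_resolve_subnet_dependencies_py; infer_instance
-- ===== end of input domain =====

-- B replaces A's nested type-by-type rescans with one partitioning pass into per-type buckets
-- concatenated in creation order (objective: simpler single pass; same observable result).

-- the members of SubnetType, in creation order (StrEnum auto() values)
def pvSnTypes : List String := ["nat", "vpn", "compute", "app"]

-- ===== PORT A =====
def resolve_subnet_dependencies_py (sn_configs : List (String × List (String × String))) : List (String × List (String × String)) :=
  -- ordered_subnet_configs = {}; processed_keys = []; the two nested loops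
  let st := pvSnTypes.foldl
    (fun (st : PySem.Dict String (List (String × String)) × List String) sn_type =>
      sn_configs.foldl
        (fun st p =>
          if some sn_type == (PySem.Dict.mk p.2).get? "type" then
            (st.1.insert p.1 p.2, st.2 ++ [p.1])
          else st)
        st)
    (PySem.Dict.empty, [])
  -- ordered_subnet_configs.update({k: v for k, v in sn_configs.items() if k not in processed_keys})
  ((sn_configs.filter (fun p => !(st.2.contains p.1))).foldl
      (fun d p => d.insert p.1 p.2) st.1).items

-- ===== PORT B =====
def resolve_subnet_dependencies_py_alt (sn_configs : List (String × List (String × String))) : List (String × List (String × String)) :=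
  -- buckets = {t: [] for t in SubnetType}; other = []; one pass dispatching each config
  -- (buckets.get(cfg.get("type", None), other).append(...) ported as an if-chain over the 4 keys)
  let bs := sn_configs.foldl
    (fun (bs : List (String × List (String × String)) × List (String × List (String × String)) ×
               List (String × List (String × String)) × List (String × List (String × String)) ×
               List (String × List (String × String))) p =>
      let t := (PySem.Dict.mk p.2).get? "type"
      if t == some "nat" then (bs.1 ++ [p], bs.2.1, bs.2.2.1, bs.2.2.2.1, bs.2.2.2.2)
      else if t == some "vpn" then (bs.1, bs.2.1 ++ [p], bs.2.2.1, bs.2.2.2.1, bs.2.2.2.2)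
      else if t == some "compute" then (bs.1, bs.2.1, bs.2.2.1 ++ [p], bs.2.2.2.1, bs.2.2.2.2)
      else if t == some "app" then (bs.1, bs.2.1, bs.2.2.1, bs.2.2.2.1 ++ [p], bs.2.2.2.2)
      else (bs.1, bs.2.1, bs.2.2.1, bs.2.2.2.1, bs.2.2.2.2 ++ [p]))
    ([], [], [], [], [])
  -- result = nat + vpn + compute + app; return dict(result + other)
  (PySem.Dict.ofList (bs.1 ++ bs.2.1 ++ bs.2.2.1 ++ bs.2.2.2.1 ++ bs.2.2.2.2)).items

-- ===== PRECONDITION & SPEC =====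
-- Pre_ excludes association lists with duplicate keys (outer, or inside a config): the Python
-- argument is a dict of dicts, where duplicate keys cannot coexist, so such lists do not encode
-- a valid input of A.
def Pre_resolve_subnet_dependencies_py (sn_configs : List (String × List (String × String))) : Prop :=
  (sn_configs.map Prod.fst).Nodup ∧ ∀ p ∈ sn_configs, (p.2.map Prod.fst).Nodup
instance (sn_configs : List (String × List (String × String))) : Decidable (Pre_resolve_subnet_dependencies_py sn_configs) := by unfold Pre_resolve_subnet_dependencies_py; infer_instance
def pvWitness_resolve_subnet_dependencies_py : (List (String × List (String × String))) :=
  [("b", [("type", "app")]), ("a", [("type", "nat"), ("cidr", "10.0.0.0/24")]), ("c", [])]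

def Spec_resolve_subnet_dependencies_py (sn_configs : List (String × List (String × String))) (out : List (String × List (String × String))) : Prop := out = resolve_subnet_dependencies_py_alt sn_configs
instance (sn_configs : List (String × List (String × String))) (out : List (String × List (String × String))) : Decidable (Spec_resolve_subnet_dependencies_py sn_configs out) := by unfold Spec_resolve_subnet_dependencies_py; infer_instance

-- ===== CLAIM (what is proved, stated in full; the proofs are below) =====
def Claim_equal_resolve_subnet_dependencies_py : Prop := ∀ (sn_configs : List (String × List (String × String))), Dom_resolve_subnet_dependencies_py sn_configs → Pre_resolve_subnet_dependencies_py sn_configs → Spec_resolve_subnet_dependencies_py sn_configs (resolve_subnet_dependencies_py sn_configs)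

-- ===== LEMMAS AND PROOFS =====

theorem pv_beq_comm (a b : Option String) : (a == b) = (b == a) := by
  cases a <;> cases b <;> simp [eq_comm]

-- A's inner loop over sn_configs for one type = filter + insert-fold + collected keys
theorem pv_innerA (t : String) (l : List (String × List (String × String)))
    (st : PySem.Dict String (List (String × String)) × List String) :
    l.foldl
      (fun st p =>
        if some t == (PySem.Dict.mk p.2).get? "type" then
          (st.1.insert p.1 p.2, st.2 ++ [p.1])
        else st) st
    = ((l.filter (fun p => (PySem.Dict.mk p.2).get? "type" == some t)).foldl
         (fun d p => d.insert p.1 p.2) st.1,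
       st.2 ++ (l.filter (fun p => (PySem.Dict.mk p.2).get? "type" == some t)).map Prod.fst) := by
  induction l generalizing st with
  | nil => simp
  | cons x xs ih =>
      rw [List.foldl_cons]
      by_cases h : (some t == (PySem.Dict.mk x.2).get? "type") = true
      · have h' : ((PySem.Dict.mk x.2).get? "type" == some t) = true := by
          rw [pv_beq_comm] at h; exact h
        rw [if_pos h, ih]
        simp [h']
      · have h' : ((PySem.Dict.mk x.2).get? "type" == some t) = false := by
          rw [pv_beq_comm] at h; simpa using h
        rw [if_neg (by simp [h]), ih]
        simp [h']

-- B's single pass = the five filters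
theorem pv_bfold (l : List (String × List (String × String)))
    (bs : List (String × List (String × String)) × List (String × List (String × String)) ×
          List (String × List (String × String)) × List (String × List (String × String)) ×
          List (String × List (String × String))) :
    l.foldl
      (fun bs p =>
        let t := (PySem.Dict.mk p.2).get? "type"
        if t == some "nat" then (bs.1 ++ [p], bs.2.1, bs.2.2.1, bs.2.2.2.1, bs.2.2.2.2)
        else if t == some "vpn" then (bs.1, bs.2.1 ++ [p], bs.2.2.1, bs.2.2.2.1, bs.2.2.2.2)
        else if t == some "compute" then (bs.1, bs.2.1, bs.2.2.1 ++ [p], bs.2.2.2.1, bs.2.2.2.2)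
        else if t == some "app" then (bs.1, bs.2.1, bs.2.2.1, bs.2.2.2.1 ++ [p], bs.2.2.2.2)
        else (bs.1, bs.2.1, bs.2.2.1, bs.2.2.2.1, bs.2.2.2.2 ++ [p])) bs
    = (bs.1 ++ l.filter (fun p => (PySem.Dict.mk p.2).get? "type" == some "nat"),
       bs.2.1 ++ l.filter (fun p => (PySem.Dict.mk p.2).get? "type" == some "vpn"),
       bs.2.2.1 ++ l.filter (fun p => (PySem.Dict.mk p.2).get? "type" == some "compute"),
       bs.2.2.2.1 ++ l.filter (fun p => (PySem.Dict.mk p.2).get? "type" == some "app"),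
       bs.2.2.2.2 ++ l.filter (fun p =>
         (PySem.Dict.mk p.2).get? "type" != some "nat" &&
         (PySem.Dict.mk p.2).get? "type" != some "vpn" &&
         (PySem.Dict.mk p.2).get? "type" != some "compute" &&
         (PySem.Dict.mk p.2).get? "type" != some "app")) := by
  induction l generalizing bs with
  | nil => simp
  | cons x xs ih =>
      rw [List.foldl_cons]
      rcases hx : (PySem.Dict.mk x.2).get? "type" with _ | tv
      · simp only [ih]
        simp [hx]
      · by_cases h1 : tv = "nat"
        · subst h1; simp only [ih]; simp [hx]
        · by_cases h2 : tv = "vpn"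
          · subst h2; simp only [ih]; simp [hx]
          · by_cases h3 : tv = "compute"
            · subst h3; simp only [ih]; simp [hx]
            · by_cases h4 : tv = "app"
              · subst h4; simp only [ih]; simp [hx]
              · simp only [ih]; simp [hx, h1, h2, h3, h4]

theorem pv_ofList_eq_foldl (l : List (String × List (String × String))) :
    PySem.Dict.ofList l
      = l.foldl (fun d p => d.insert p.1 p.2) PySem.Dict.empty := by
  show PySem.Dict.update PySem.Dict.empty l = _
  generalize PySem.Dict.empty = d
  induction l generalizing d with
  | nil => rfl
  | cons x xs ih => simp [PySem.Dict.update]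

theorem pv_mem_map_fst_filter (l : List (String × List (String × String)))
    (c : (String × List (String × String)) → Bool)
    (hn : (l.map Prod.fst).Nodup) (p : String × List (String × String)) (hp : p ∈ l) :
    (p.1 ∈ (l.filter c).map Prod.fst) ↔ c p = true := by
  constructor
  · intro h
    obtain ⟨q, hq, hq1⟩ := List.mem_map.1 h
    obtain ⟨hql, hqc⟩ := List.mem_filter.1 hq
    have := List.inj_on_of_nodup_map hn hql hp hq1
    rwa [this] at hqc
  · intro h
    exact List.mem_map.2 ⟨p, List.mem_filter.2 ⟨hp, h⟩, rfl⟩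

-- ===== VERDICT (by name: the statement is the Claim_ definition above) =====
theorem resolve_subnet_dependencies_py_spec : Claim_equal_resolve_subnet_dependencies_py := by
  intro sn_configs _ hpre
  unfold Spec_resolve_subnet_dependencies_py
  unfold resolve_subnet_dependencies_py resolve_subnet_dependencies_py_alt pvSnTypes
  rw [pv_bfold]
  simp only [List.foldl_cons, List.foldl_nil, pv_innerA, List.nil_append]
  rw [pv_ofList_eq_foldl]
  rw [← List.foldl_append, ← List.foldl_append, ← List.foldl_append, ← List.foldl_append]
  simp only [List.append_assoc]
  apply congrArg PySem.Dict.items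
  apply congrArg
  rw [List.append_right_inj, List.append_right_inj, List.append_right_inj, List.append_right_inj]
  apply List.filter_congr
  intro p hp
  have h1 := pv_mem_map_fst_filter sn_configs
    (fun p => (PySem.Dict.mk p.2).get? "type" == some "nat") hpre.1 p hp
  have h2 := pv_mem_map_fst_filter sn_configs
    (fun p => (PySem.Dict.mk p.2).get? "type" == some "vpn") hpre.1 p hp
  have h3 := pv_mem_map_fst_filter sn_configs
    (fun p => (PySem.Dict.mk p.2).get? "type" == some "compute") hpre.1 p hp
  have h4 := pv_mem_map_fst_filter sn_configs
    (fun p => (PySem.Dict.mk p.2).get? "type" == some "app") hpre.1 p hp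
  rw [Bool.eq_iff_iff]
  simp only [List.contains_eq_mem, Bool.not_eq_eq_eq_not, Bool.not_true,
    decide_eq_false_iff_not, Bool.and_eq_true, bne_iff_ne, ne_eq]
  simp only [List.mem_append, not_or, h1, h2, h3, h4, beq_iff_eq]
  tauto
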